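-- pv_equiv track=rewrite | github.com/Maxic/Nonogrammer | nonogram.py | generate_nonogram_rows
-- ===== SOURCE A (Python) =====
-- def generate_nonogram_rows(matrix):
--     nonogram_rows = []
--     for row in matrix:
--         count = 0
--         row_numbers = []
--         for index in row:
--             # Value that's not filled in is either 0 or None
--             if index:
--                 count += 1
--             elif count != 0:
--                 row_numbers.append(count)
--                 count = 0
--         if count != 0:
--             row_numbers.append(count)
--         nonogram_rows.append(row_numbers)
--     return nonogram_rows
-- ===== SOURCE B (Python) =====
-- def generate_nonogram_rows(matrix):
--     def clues(row):
--         out = []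
--         while row:
--             if row[0]:
--                 run = 0
--                 while run < len(row) and row[run]:
--                     run += 1
--                 out.append(run)
--                 row = row[run:]
--             else:
--                 row = row[1:]
--         return out
--     return [clues(row) for row in matrix]
-- ===== Notes on version B (the rewrite author's own statement) =====
-- stated objective: alternative
-- what changed: Replaces A's per-cell counter-and-flush accumulator with a run-splitting scan: each row is consumed by measuring the length of the leading maximal nonzero run (emitted as a clue) or skipping a leading zero, instead of maintaining a running count flushed on zero/row-end.
import Mathlib
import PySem

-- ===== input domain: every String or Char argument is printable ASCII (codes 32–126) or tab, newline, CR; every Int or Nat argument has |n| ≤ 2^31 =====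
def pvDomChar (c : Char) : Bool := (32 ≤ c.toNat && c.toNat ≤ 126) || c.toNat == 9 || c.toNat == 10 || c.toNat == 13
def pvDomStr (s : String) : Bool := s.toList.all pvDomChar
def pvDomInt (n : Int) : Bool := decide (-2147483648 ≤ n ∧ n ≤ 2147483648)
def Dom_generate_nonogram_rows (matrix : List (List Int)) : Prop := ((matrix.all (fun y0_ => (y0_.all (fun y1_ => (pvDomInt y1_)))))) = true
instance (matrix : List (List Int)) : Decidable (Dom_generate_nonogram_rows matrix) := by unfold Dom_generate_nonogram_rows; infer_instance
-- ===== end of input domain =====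

-- B is an alternative decomposition (run-splitting scan instead of A's counter-and-flush accumulator); same cost, proven equal on all inputs.

-- ===== PORT A =====
-- inner loop of A: state (count, row_numbers), one step per cell
def pvLoopA : List Int → Int → List Int → Int × List Int
  | [], count, row_numbers => (count, row_numbers)
  | v :: vs, count, row_numbers =>
    if v ≠ 0 then pvLoopA vs (count + 1) row_numbers
    else if count ≠ 0 then pvLoopA vs 0 (row_numbers ++ [count])
    else pvLoopA vs count row_numbers

-- after the inner loop: final flush of the pending count
def pvFinishA (p : Int × List Int) : List Int :=
  if p.1 ≠ 0 then p.2 ++ [p.1] else p.2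

def generate_nonogram_rows (matrix : List (List Int)) : List (List Int) :=
  matrix.map (fun row => pvFinishA (pvLoopA row 0 []))

-- ===== PORT B =====
-- length of the leading maximal nonzero run ('while run < len(row) and row[run]: run += 1')
def pvRunLen : List Int → Nat
  | [] => 0
  | v :: vs => if v ≠ 0 then pvRunLen vs + 1 else 0

-- 'clues' of Source B: split off the leading run (emit its length) or skip a leading zero
def pvClues : List Int → List Int
  | [] => []
  | v :: vs =>
    if v ≠ 0 then
      ((pvRunLen (v :: vs) : Int)) :: pvClues ((v :: vs).drop (pvRunLen (v :: vs)))
    else pvClues vs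
termination_by row => row.length
decreasing_by
  · have h1 : 1 ≤ pvRunLen (v :: vs) := by
      simp only [pvRunLen]
      split
      · omega
      · simp_all
    have h2 : ((v :: vs).drop (pvRunLen (v :: vs))).length = (v :: vs).length - pvRunLen (v :: vs) := List.length_drop ..
    simp only [h2, List.length_cons]
    omega
  · simp

def generate_nonogram_rows_alt (matrix : List (List Int)) : List (List Int) :=
  matrix.map (fun row => pvClues row)

-- ===== PRECONDITION & SPEC =====
def Spec_generate_nonogram_rows (matrix : List (List Int)) (out : List (List Int)) : Prop := out = generate_nonogram_rows_alt matrix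
instance (matrix : List (List Int)) (out : List (List Int)) : Decidable (Spec_generate_nonogram_rows matrix out) := by unfold Spec_generate_nonogram_rows; infer_instance

-- ===== CLAIM (what is proved, stated in full; the proofs are below) =====
def Claim_equal_generate_nonogram_rows : Prop := ∀ (matrix : List (List Int)), Dom_generate_nonogram_rows matrix → Spec_generate_nonogram_rows matrix (generate_nonogram_rows matrix)

-- ===== LEMMAS AND PROOFS =====

-- abstract form of A's inner loop: the clues still to be emitted given pending count c
def pvCarry : Int → List Int → List Int
  | c, [] => if c ≠ 0 then [c] else []
  | c, v :: vs =>
    if v ≠ 0 then pvCarry (c + 1) vs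
    else if c ≠ 0 then c :: pvCarry 0 vs
    else pvCarry 0 vs

theorem pvLoopA_eq (row : List Int) : ∀ (c : Int) (ns : List Int),
    pvFinishA (pvLoopA row c ns) = ns ++ pvCarry c row := by
  induction row with
  | nil =>
    intro c ns
    simp only [pvLoopA, pvFinishA, pvCarry]
    split <;> simp
  | cons v vs ih =>
    intro c ns
    simp only [pvLoopA, pvCarry]
    by_cases hv : v ≠ 0
    · simp only [if_pos hv, ih]
    · simp only [if_neg hv]
      by_cases hc : c ≠ 0
      · simp only [if_pos hc, ih, List.append_assoc, List.singleton_append]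
      · simp only [if_neg hc]
        have : c = 0 := by omega
        subst this
        exact ih 0 ns

theorem pvCarry_eq_pvClues (row : List Int) :
    (pvCarry 0 row = pvClues row) ∧
    (∀ c : Int, 0 < c →
      pvCarry c row = ((c + (pvRunLen row : Int)) :: pvClues (row.drop (pvRunLen row)))) := by
  induction row with
  | nil =>
    refine ⟨by simp [pvCarry, pvClues], ?_⟩
    intro c hc
    simp only [pvCarry, pvRunLen, pvClues, List.drop_nil]
    split
    · simp
    · omega
  | cons v vs ih =>
    by_cases hv : v ≠ 0
    · constructor
      · rw [show pvCarry 0 (v :: vs) = pvCarry 1 vs by simp [pvCarry, hv]]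
        rw [(ih.2 1 (by omega))]
        rw [show pvClues (v :: vs) = ((pvRunLen (v :: vs) : Int)) :: pvClues ((v :: vs).drop (pvRunLen (v :: vs))) by rw [pvClues]; simp [hv]]
        simp only [pvRunLen, if_pos hv, List.drop_succ_cons]
        congr 1
        push_cast; omega
      · intro c hc
        rw [show pvCarry c (v :: vs) = pvCarry (c + 1) vs by simp [pvCarry, hv]]
        rw [(ih.2 (c + 1) (by omega))]
        simp only [pvRunLen, if_pos hv, List.drop_succ_cons]
        congr 1
        push_cast; omega
    · have hv0 : v = 0 := by omega
      subst hv0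
      constructor
      · rw [show pvCarry 0 ((0:Int) :: vs) = pvCarry 0 vs by simp [pvCarry]]
        rw [ih.1]
        conv_rhs => rw [pvClues.eq_def]
        simp
      · intro c hc
        rw [show pvCarry c ((0:Int) :: vs) = c :: pvCarry 0 vs by simp [pvCarry]; omega]
        rw [ih.1]
        simp only [pvRunLen]
        conv_rhs => rw [pvClues.eq_def]
        simp

-- ===== VERDICT (by name: the statement is the Claim_ definition above) =====
theorem generate_nonogram_rows_spec : Claim_equal_generate_nonogram_rows := by
  intro matrix _
  unfold Spec_generate_nonogram_rows generate_nonogram_rows generate_nonogram_rows_alt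
  apply List.map_congr_left
  intro row _
  rw [pvLoopA_eq row 0 [], List.nil_append, (pvCarry_eq_pvClues row).1]
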